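-- pv_equiv track=rewrite | github.com/shahyash29/Cold-Email-Generator | genai.py | query_portfolio_links_with_projects
-- ===== SOURCE A (Python) =====
-- def query_portfolio_links_with_projects(projects, urls):
--     relevant_projects = []
--     for project in projects:
--         # Assign URL if available, else show 'No URL found'
--         if urls:
--             relevant_projects.append(f"{project}: {urls.pop(0)}")  # Use the first available URL for each project
--         else:
--             relevant_projects.append(f"{project}: No URL found")
--     return relevant_projects
-- ===== SOURCE B (Python) =====
-- def query_portfolio_links_with_projects(projects, urls):
--     k = min(len(projects), len(urls))
--     matched = [f"{p}: {u}" for p, u in zip(projects[:k], urls[:k])]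
--     unmatched = [f"{p}: No URL found" for p in projects[k:]]
--     del urls[:k]  # reproduce A's consumption of urls via pop(0)
--     return matched + unmatched
-- ===== Notes on version B (the rewrite author's own statement) =====
-- stated objective: faster
-- what changed: Replaces the per-project branching loop with repeated urls.pop(0) (each pop is O(n)) by a split at k = min(len(projects), len(urls)): a zip-built matched list, a mapped unmatched tail, and one del urls[:k] for the mutation.
import Mathlib
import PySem

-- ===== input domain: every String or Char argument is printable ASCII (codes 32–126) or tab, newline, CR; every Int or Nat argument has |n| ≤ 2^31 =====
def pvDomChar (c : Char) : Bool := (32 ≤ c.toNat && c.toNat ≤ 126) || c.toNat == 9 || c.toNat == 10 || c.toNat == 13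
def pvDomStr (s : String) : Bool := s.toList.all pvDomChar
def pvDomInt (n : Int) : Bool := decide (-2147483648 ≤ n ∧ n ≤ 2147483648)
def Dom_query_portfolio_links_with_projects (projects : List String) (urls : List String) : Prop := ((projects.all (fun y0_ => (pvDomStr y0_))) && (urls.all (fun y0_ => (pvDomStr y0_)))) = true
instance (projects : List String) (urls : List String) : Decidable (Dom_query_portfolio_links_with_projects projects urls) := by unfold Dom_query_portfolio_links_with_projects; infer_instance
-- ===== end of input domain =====

-- ===== PORT A =====
-- Note: the Python A mutates `urls` (pop(0)); B performs the same mutation (del urls[:k]);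
-- the equivalence proved here is about the return value.
def query_portfolio_links_with_projects (projects : List String) (urls : List String) : List String :=
  (projects.foldl
    (fun (st : List String × List String) project =>
      match st.2 with
      | u :: rest => (st.1 ++ [project ++ ": " ++ u], rest)
      | [] => (st.1 ++ [project ++ ": No URL found"], st.2))
    ([], urls)).1

-- ===== PORT B =====
-- B changes decomposition: split at k = min of the lengths, build matched and unmatched parts separately.
def query_portfolio_links_with_projects_alt (projects : List String) (urls : List String) : List String :=
  let k := min projects.length urls.length
  (List.zipWith (fun p u => p ++ ": " ++ u) (projects.take k) (urls.take k))
    ++ (projects.drop k).map (fun p => p ++ ": No URL found")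

-- ===== PRECONDITION & SPEC =====
def Spec_query_portfolio_links_with_projects (projects : List String) (urls : List String) (out : List String) : Prop := out = query_portfolio_links_with_projects_alt projects urls
instance (projects : List String) (urls : List String) (out : List String) : Decidable (Spec_query_portfolio_links_with_projects projects urls out) := by unfold Spec_query_portfolio_links_with_projects; infer_instance

-- ===== CLAIM (what is proved, stated in full; the proofs are below) =====
def Claim_equal_query_portfolio_links_with_projects : Prop := ∀ (projects : List String) (urls : List String), Dom_query_portfolio_links_with_projects projects urls → Spec_query_portfolio_links_with_projects projects urls (query_portfolio_links_with_projects projects urls)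

-- ===== LEMMAS AND PROOFS =====

lemma qplwp_fold_eq (ps : List String) : ∀ (urls acc : List String),
    (ps.foldl
      (fun (st : List String × List String) project =>
        match st.2 with
        | u :: rest => (st.1 ++ [project ++ ": " ++ u], rest)
        | [] => (st.1 ++ [project ++ ": No URL found"], st.2))
      (acc, urls)).1 = acc ++ query_portfolio_links_with_projects_alt ps urls := by
  induction ps with
  | nil => intro urls acc; simp [query_portfolio_links_with_projects_alt]
  | cons p ps ih =>
    intro urls acc
    cases urls with
    | nil =>
      simp only [List.foldl_cons, ih]
      simp [query_portfolio_links_with_projects_alt]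
    | cons u us =>
      simp only [List.foldl_cons, ih]
      simp [query_portfolio_links_with_projects_alt, Nat.succ_min_succ]

-- ===== VERDICT (by name: the statement is the Claim_ definition above) =====
theorem query_portfolio_links_with_projects_spec : Claim_equal_query_portfolio_links_with_projects := by
  intro projects urls _
  unfold Spec_query_portfolio_links_with_projects query_portfolio_links_with_projects
  simpa using qplwp_fold_eq projects urls []
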